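-- pv_equiv track=rewrite | github.com/Vergil0327/leetcode-history | Segment Tree/3691. Maximum Total Subarray Value II/solution.py | maxTotalValue
-- ===== SOURCE A (Python) =====
-- from typing import List
--
-- import heapq
--
-- class SegmentTree():
--     def __init__(self, A, op=min):
--         n = len(A)
--
--         self.st = st = ([0]*n+A)
--         for i in range(n-1, 0, -1):
--             st[i] = op(st[i<<1], st[i<<1|1])
--
--         self.op = op
--         self.n = n
--
--     def __getitem__(self, i):
--         return self.st[i+self.n]
--
--     def __setitem__(self, i, v):
--         st, op, n = self.st, self.op, self.n
--         i += n
--         st[i] = v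
--
--         while i:
--             st[i>>1] = op(st[i], st[i^1])
--             i >>= 1
--
--     # 雙閉區間 [l,r] both inclusive
--     def query(self, l, r):
--         st, op , n = self.st, self.op, self.n
--         l, r = l+n, r+n
--
--         res = float('inf') if op == min else -float('inf')
--         while l <= r:
--             if l == r:
--                 res = op(res, st[l])
--                 break
--             if l&1 == 1:
--                 res = op(res, st[l])
--                 l += 1
--             if r&1 == 0:
--                 res = op(res, st[r])
--                 r -= 1
--             l, r = l >> 1, r >> 1
--
--         return res
--
-- def maxTotalValue(nums: List[int], k: int) -> int:
--     n = len(nums)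
--     rootMax = SegmentTree(nums, max)
--     rootMin = SegmentTree(nums, min)
--     value = lambda l, r : rootMax.query(l, r) - rootMin.query(l, r)
--
--     pq = []
--     for l in range(n):
--         heapq.heappush(pq, [-value(l, n-1), l, n-1])
--
--     res = 0
--     while k:
--         negVal, l, r = heapq.heappop(pq)
--         res += -negVal
--
--         if l <= r-1:
--             heapq.heappush(pq, [-value(l, r-1), l, r-1])
--         k -= 1
--     return res
-- ===== SOURCE B (Python) =====
-- def maxTotalValue(nums, k):
--     # collect (max - min) of every subarray with running max/min, sort once, sum the k largest
--     vals = []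
--     n = len(nums)
--     for l in range(n):
--         mx = nums[l]
--         mn = nums[l]
--         for r in range(l, n):
--             x = nums[r]
--             mx = max(mx, x)
--             mn = min(mn, x)
--             vals.append(mx - mn)
--     vals.sort(reverse=True)
--     res = 0
--     for _ in range(k):
--         res += vals.pop(0)
--     return res
-- ===== Notes on version B (the rewrite author's own statement) =====
-- stated objective: simpler
-- what changed: Replaces the two segment trees plus the shrinking-interval max-heap with brute-force enumeration of every subarray's (max-min) via running max/min, one descending sort, and summing the k largest by popping.
import Mathlib
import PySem

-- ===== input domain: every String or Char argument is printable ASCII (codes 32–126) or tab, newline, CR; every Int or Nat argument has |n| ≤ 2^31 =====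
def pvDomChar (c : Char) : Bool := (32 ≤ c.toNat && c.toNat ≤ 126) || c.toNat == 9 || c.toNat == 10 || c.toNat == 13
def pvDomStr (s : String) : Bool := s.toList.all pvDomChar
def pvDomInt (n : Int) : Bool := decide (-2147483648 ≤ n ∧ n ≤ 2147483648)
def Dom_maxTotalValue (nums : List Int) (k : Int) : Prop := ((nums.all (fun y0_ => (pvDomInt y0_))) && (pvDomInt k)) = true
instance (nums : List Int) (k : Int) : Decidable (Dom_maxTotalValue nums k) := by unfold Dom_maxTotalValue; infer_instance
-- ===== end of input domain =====

-- B replaces A's two segment trees and max-heap of shrinking intervals with brute-force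
-- enumeration of all subarray (max-min) values, one descending sort and a k-pop sum (simpler, not faster).

-- ===== PORT A =====

-- op(±inf, x) in Python's query seed: `none` models the seed, optOp models one op step
def optOp (op : Int → Int → Int) (res : Option Int) (x : Int) : Option Int :=
  match res with
  | none => some x
  | some r => some (op r x)

-- SegmentTree.__init__: st = [0]*n + A; for i in range(n-1, 0, -1): st[i] = op(st[2i], st[2i+1])
def stBuild (op : Int → Int → Int) (A : List Int) : Array Int :=
  let n : Int := A.length
  let st := (List.replicate A.length (0 : Int) ++ A).toArray
  (PySem.List.pyRange (n - 1) 0 (-1)).foldl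
    (fun st i => st.setIfInBounds i.toNat (op (st.getD (2*i).toNat 0) (st.getD (2*i+1).toNat 0))) st

-- SegmentTree.query while-loop.  The extra `1 ≤ r` guard is for termination only: every call
-- reachable from maxTotalValue has 1 ≤ l ≤ r, where it is implied by Python's `l <= r` test.
def stQueryLoop (op : Int → Int → Int) (st : Array Int) (l r : Int) (res : Option Int) : Option Int :=
  if h : l ≤ r ∧ 1 ≤ r then
    if l = r then optOp op res (st.getD l.toNat 0)
    else
      let res1 := if PySem.Int.mod l 2 = 1 then optOp op res (st.getD l.toNat 0) else res
      let l1 := if PySem.Int.mod l 2 = 1 then l + 1 else l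
      let res2 := if PySem.Int.mod r 2 = 0 then optOp op res1 (st.getD r.toNat 0) else res1
      let r1 := if PySem.Int.mod r 2 = 0 then r - 1 else r
      stQueryLoop op st (PySem.Int.floordiv l1 2) (PySem.Int.floordiv r1 2) res2
  else res
termination_by r.toNat
decreasing_by
  simp only [PySem.Int.floordiv_eq_ediv_of_pos (by omega : (0:Int) < 2)]
  split <;> omega

def stQuery (op : Int → Int → Int) (st : Array Int) (n l r : Int) : Option Int :=
  stQueryLoop op st (l + n) (r + n) none

-- Python list comparison [-v, l, r] <= [-v', l', r'] (lexicographic); entries are heap-ordered by it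
def tripLe (a b : Int × Int × Int) : Bool :=
  a.1 < b.1 || (a.1 == b.1 && (a.2.1 < b.2.1 || (a.2.1 == b.2.1 && a.2.2 ≤ b.2.2)))

-- heapq modelled as a tripLe-sorted list: heappush = ordered insert, heappop = head (the minimum)
def hpush (x : Int × Int × Int) : List (Int × Int × Int) → List (Int × Int × Int)
  | [] => [x]
  | y :: ys => if tripLe x y then x :: y :: ys else y :: hpush x ys

theorem hpush_perm (x : Int × Int × Int) (l : List (Int × Int × Int)) :
    (hpush x l).Perm (x :: l) := by
  induction l with
  | nil => simp [hpush]
  | cons y ys ih =>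
    simp only [hpush]
    split
    · exact List.Perm.refl _
    · exact (ih.cons y).trans (List.Perm.swap x y ys)

-- termination measure for the main loop
def pqMeas (pq : List (Int × Int × Int)) : Nat :=
  (pq.map (fun e => (e.2.2 - e.2.1 + 2).toNat + 1)).sum

theorem pqMeas_hpush (x : Int × Int × Int) (pq : List (Int × Int × Int)) :
    pqMeas (hpush x pq) = pqMeas (x :: pq) :=
  List.Perm.sum_eq (List.Perm.map _ (hpush_perm x pq))

-- `while k:` loop: pop the max-value interval, add its value, push the interval shrunk on the right
def aloop (value : Int → Int → Int) (pq : List (Int × Int × Int)) (k : Int) (res : Int) : Int :=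
  if k = 0 then res
  else
    match pq with
    | [] => res   -- Python: heappop raises IndexError here (excluded by Pre_)
    | (x, l, r) :: rest =>
      let res' := res + (-x)
      let pq' := if l ≤ r - 1 then hpush (-(value l (r - 1)), l, r - 1) rest else rest
      aloop value pq' (k - 1) res'
termination_by pqMeas pq
decreasing_by
  split
  · rw [pqMeas_hpush]
    simp only [pqMeas, List.map_cons, List.sum_cons]
    omega
  · simp only [pqMeas, List.map_cons, List.sum_cons]
    omega

def maxTotalValue (nums : List Int) (k : Int) : Int :=
  let n : Int := nums.length
  let stMax := stBuild (fun a b => max a b) nums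
  let stMin := stBuild (fun a b => min a b) nums
  let value := fun l r =>
    (stQuery (fun a b => max a b) stMax n l r).getD 0 - (stQuery (fun a b => min a b) stMin n l r).getD 0
  let pq := (PySem.List.pyRange 0 n 1).foldl (fun pq l => hpush (-(value l (n - 1)), l, n - 1) pq) []
  aloop value pq k 0

-- ===== PORT B =====

-- inner loop: for r in range(l, n): update running max/min, append (mx - mn)
def innerB (mx mn : Int) (vals : List Int) : List Int → List Int
  | [] => vals
  | x :: xs => innerB (max mx x) (min mn x) (vals ++ [max mx x - min mn x]) xs

def collectB (nums : List Int) : List Int :=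
  (List.range nums.length).foldl
    (fun vals l => innerB (nums.getD l 0) (nums.getD l 0) vals (nums.drop l)) []

-- for _ in range(k): res += vals.pop(0)
def popSumB : List Int → Nat → Int → Int
  | _, 0, res => res
  | [], _ + 1, res => res   -- Python: pop(0) on empty raises IndexError (excluded by Pre_)
  | v :: vs, m + 1, res => popSumB vs m (res + v)

def maxTotalValue_alt (nums : List Int) (k : Int) : Int :=
  let vals := collectB nums
  let s := PySem.List.sorted vals (fun x => x) true
  popSumB s k.toNat 0

-- ===== PRECONDITION & SPEC =====
-- Pre_ excludes exactly the inputs where A raises IndexError: k < 0 (heap eventually drained)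
-- and k larger than the number n(n+1)/2 of subarrays (heap drained before k pops).
def Pre_maxTotalValue (nums : List Int) (k : Int) : Prop :=
  0 ≤ k ∧ k ≤ ((nums.length * (nums.length + 1)) / 2 : Nat)
instance (nums : List Int) (k : Int) : Decidable (Pre_maxTotalValue nums k) := by
  unfold Pre_maxTotalValue; infer_instance

def pvWitness_maxTotalValue : List Int × Int := ([1, 3, 2], 3)

def Spec_maxTotalValue (nums : List Int) (k : Int) (out : Int) : Prop := out = maxTotalValue_alt nums k
instance (nums : List Int) (k : Int) (out : Int) : Decidable (Spec_maxTotalValue nums k out) := by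
  unfold Spec_maxTotalValue; infer_instance

-- ===== CLAIM (what is proved, stated in full; the proofs are below) =====
def Claim_equal_maxTotalValue : Prop := ∀ (nums : List Int) (k : Int), Dom_maxTotalValue nums k → Pre_maxTotalValue nums k → Spec_maxTotalValue nums k (maxTotalValue nums k)

-- ===== LEMMAS AND PROOFS =====

-- abbreviation for folding optOp over a list
def ofold (op : Int → Int → Int) (res : Option Int) (xs : List Int) : Option Int :=
  xs.foldl (optOp op) res


-- the subarray nums[l..r] and its (max - min) value
def seg (nums : List Int) (l r : Nat) : List Int := (nums.drop l).take (r + 1 - l)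

def vspec (nums : List Int) (l r : Nat) : Int :=
  (seg nums l r).foldl (fun a b => max a b) (nums.getD l 0)
    - (seg nums l r).foldl (fun a b => min a b) (nums.getD l 0)

-- the multiset of values an A-heap entry (·, l, r) still covers: v(l,r), v(l,r-1), …, v(l,l)
def entryVals (v : Int → Int → Int) (l r : Int) : List Int :=
  if l ≤ r then v l r :: entryVals v l (r - 1) else []
termination_by (r - l + 1).toNat
decreasing_by omega

def covered (v : Int → Int → Int) (pq : List (Int × Int × Int)) : List Int :=
  pq.flatMap (fun e => entryVals v e.2.1 e.2.2)

def EntriesOK (v : Int → Int → Int) (n : Nat) (pq : List (Int × Int × Int)) : Prop :=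
  ∀ e ∈ pq, 0 ≤ e.2.1 ∧ e.2.1 ≤ e.2.2 ∧ e.2.2 < (n : Int) ∧ e.1 = -(v e.2.1 e.2.2)

theorem optOp_optOp (op : Int → Int → Int)
    (hassoc : ∀ a b c, op (op a b) c = op a (op b c)) (res : Option Int) (x y : Int) :
    optOp op (optOp op res x) y = optOp op res (op x y) := by
  cases res <;> simp [optOp, hassoc]

theorem optOp_swap (op : Int → Int → Int)
    (hassoc : ∀ a b c, op (op a b) c = op a (op b c))
    (hcomm : ∀ a b, op a b = op b a) (res : Option Int) (x y : Int) :
    optOp op (optOp op res x) y = optOp op (optOp op res y) x := by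
  rw [optOp_optOp op hassoc, optOp_optOp op hassoc, hcomm x y]

-- pull one peeled element past the rest of the fold
theorem ofold_pull (op : Int → Int → Int)
    (hassoc : ∀ a b c, op (op a b) c = op a (op b c))
    (hcomm : ∀ a b, op a b = op b a) :
    ∀ (xs : List Int) (res : Option Int) (y : Int),
    ofold op (optOp op res y) xs = optOp op (ofold op res xs) y := by
  intro xs
  induction xs with
  | nil => intro res y; rfl
  | cons x xs ih =>
    intro res y
    show ofold op (optOp op (optOp op res y) x) xs = _
    rw [optOp_swap op hassoc hcomm res y x]
    exact ih (optOp op res x) y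

-- fold over [2a, 2a+2m) regrouped into adjacent pairs
theorem ofold_pair (op : Int → Int → Int)
    (hassoc : ∀ a b c, op (op a b) c = op a (op b c)) (g : Nat → Int) :
    ∀ (m a : Nat) (res : Option Int),
    ofold op res ((List.range' (2*a) (2*m)).map g)
      = ofold op res ((List.range' a m).map (fun j => op (g (2*j)) (g (2*j+1)))) := by
  intro m
  induction m with
  | zero => intro a res; rfl
  | succ m ih =>
    intro a res
    have h1 : 2*(m+1) = 2*m+1+1 := by ring
    have h2 : List.range' (2*a) (2*m+1+1) = 2*a :: (2*a+1) :: List.range' (2*a+2) (2*m) := by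
      rw [List.range'_succ, List.range'_succ]
    have h3 : List.range' a (m+1) = a :: List.range' (a+1) m := List.range'_succ
    rw [h1, h2, h3]
    show ofold op (optOp op (optOp op res (g (2*a))) (g (2*a+1))) ((List.range' (2*a+2) (2*m)).map g) = _
    rw [optOp_optOp op hassoc]
    have : 2*a+2 = 2*(a+1) := by ring
    rw [this, ih (a+1)]
    rfl

theorem ofold_cons (op : Int → Int → Int) (res : Option Int) (x : Int) (xs : List Int) :
    ofold op res (x :: xs) = ofold op (optOp op res x) xs := rfl

theorem ofold_concat (op : Int → Int → Int) (res : Option Int) (xs : List Int) (y : Int) :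
    ofold op res (xs ++ [y]) = optOp op (ofold op res xs) y := by
  simp [ofold, List.foldl_append]

theorem pymod2_natCast (m : Nat) : PySem.Int.mod (↑m) 2 = ↑(m % 2) := by
  rw [PySem.Int.mod_eq_emod_of_pos (by omega)]; omega

theorem pyfdiv2_natCast (m : Nat) : PySem.Int.floordiv (↑m) 2 = ↑(m / 2) := by
  rw [PySem.Int.floordiv_eq_ediv_of_pos (by omega)]; omega

-- query correctness: given the local build invariant, the loop folds op over st[l..r]
theorem stQueryLoop_eq (op : Int → Int → Int)
    (hassoc : ∀ a b c, op (op a b) c = op a (op b c))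
    (hcomm : ∀ a b, op a b = op b a)
    (st : Array Int) (n : Nat)
    (hinv : ∀ i : Nat, 1 ≤ i → i < n → st.getD i 0 = op (st.getD (2*i) 0) (st.getD (2*i+1) 0)) :
    ∀ (r l : Nat) (res : Option Int), 1 ≤ l → l ≤ r → r ≤ 2*n - 1 →
    stQueryLoop op st (↑l) (↑r) res
      = ofold op res ((List.range' l (r - l + 1)).map (fun i => st.getD i 0)) := by
  intro r
  induction r using Nat.strong_induction_on with
  | _ r ih =>
  intro l res hl hlr hrn
  have hn : 1 ≤ n := by omega
  have key : ∀ (a b : Nat) (res2 : Option Int), 1 ≤ a → a ≤ b → b < n → b < r →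
      stQueryLoop op st (↑a) (↑b) res2
        = ofold op res2 ((List.range' (2*a) (2*(b-a+1))).map (fun i => st.getD i 0)) := by
    intro a b res2 ha hab hbn hbr
    rw [ih b hbr a res2 ha hab (by omega)]
    have hcg : (List.range' a (b - a + 1)).map (fun i => st.getD i 0)
        = (List.range' a (b - a + 1)).map (fun j => op (st.getD (2*j) 0) (st.getD (2*j+1) 0)) := by
      apply List.map_congr_left
      intro j hj
      have hj' := List.mem_range'_1.mp hj
      exact hinv j (by omega) (by omega)
    rw [hcg]
    exact (ofold_pair op hassoc (fun i => st.getD i 0) (b-a+1) a res2).symm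
  rw [stQueryLoop]
  rw [dif_pos (⟨by exact_mod_cast hlr, by exact_mod_cast (le_trans hl hlr)⟩ : ((l:Int) ≤ ↑r ∧ 1 ≤ (↑r:Int)))]
  by_cases heq : l = r
  · subst heq
    rw [if_pos rfl]
    simp [ofold, List.range'_succ]
  · have hlr' : l < r := lt_of_le_of_ne hlr heq
    rw [if_neg (by exact_mod_cast heq)]
    simp only [pymod2_natCast, Int.toNat_natCast]
    have e1 : ((l:Int) + 1) = ((l+1 : Nat) : Int) := by push_cast; ring
    have e2 : ((r:Int) - 1) = ((r-1 : Nat) : Int) := by omega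
    by_cases hlo : l % 2 = 1 <;> by_cases hre : r % 2 = 0
    · -- l odd, r even
      simp only [hlo, hre, Nat.cast_one, Nat.cast_zero, reduceIte]
      rw [e1, e2, pyfdiv2_natCast, pyfdiv2_natCast]
      by_cases hs : l + 1 = r
      · rw [stQueryLoop, dif_neg (by rintro ⟨h1, h2⟩; omega :
          ¬((((l+1)/2 : Nat):Int) ≤ ↑((r-1)/2) ∧ 1 ≤ (((r-1)/2 : Nat):Int)))]
        have h2 : r - l + 1 = 2 := by omega
        rw [h2]
        have hr2 : List.range' l 2 = [l, l+1] := by simp [List.range'_succ]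
        rw [hr2, hs]
        rfl
      · rw [key ((l+1)/2) ((r-1)/2) _ (by omega) (by omega) (by omega) (by omega)]
        have h2a : 2*((l+1)/2) = l+1 := by omega
        have h2b : 2*((r-1)/2 - (l+1)/2 + 1) = r-l-1 := by omega
        rw [h2a, h2b]
        have hsplit : List.range' l (r - l + 1) = l :: (List.range' (l+1) (r-l-1) ++ [r]) := by
          have h1 : r - l + 1 = (r-l-1+1)+1 := by omega
          rw [h1, List.range'_succ, List.range'_concat]
          have h3 : l+1+1*(r-l-1) = r := by omega
          rw [h3]
        rw [hsplit]
        simp only [List.map_cons, List.map_append, List.map_nil]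
        rw [ofold_cons, ofold_concat]
        exact ofold_pull op hassoc hcomm _ _ _
    · -- l odd, r odd
      have hro : r % 2 = 1 := by omega
      simp only [hlo, hro, Nat.cast_one, reduceIte, Int.reduceEq]
      rw [e1, pyfdiv2_natCast, pyfdiv2_natCast]
      rw [key ((l+1)/2) (r/2) _ (by omega) (by omega) (by omega) (by omega)]
      have h2a : 2*((l+1)/2) = l+1 := by omega
      have h2b : 2*(r/2 - (l+1)/2 + 1) = r-l := by omega
      rw [h2a, h2b]
      have h1 : r - l + 1 = (r-l)+1 := by omega
      rw [h1, List.range'_succ]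
      simp only [List.map_cons]
      rw [ofold_cons]
    · -- l even, r even
      have hle : l % 2 = 0 := by omega
      simp only [hle, hre, Nat.cast_zero, reduceIte, Int.reduceEq]
      rw [e2, pyfdiv2_natCast, pyfdiv2_natCast]
      rw [key (l/2) ((r-1)/2) _ (by omega) (by omega) (by omega) (by omega)]
      have h2a : 2*(l/2) = l := by omega
      have h2b : 2*((r-1)/2 - l/2 + 1) = r-l := by omega
      rw [h2a, h2b]
      have h1 : r - l + 1 = (r-l)+1 := by omega
      rw [h1, List.range'_concat]
      have h3 : l+1*(r-l) = r := by omega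
      rw [h3]
      simp only [List.map_append, List.map_cons, List.map_nil]
      rw [ofold_concat]
      exact ofold_pull op hassoc hcomm _ _ _
    · -- l even, r odd
      have hle : l % 2 = 0 := by omega
      have hro : r % 2 = 1 := by omega
      simp only [hle, hro, Nat.cast_zero, Nat.cast_one, reduceIte, Int.reduceEq]
      rw [pyfdiv2_natCast, pyfdiv2_natCast]
      rw [key (l/2) (r/2) _ (by omega) (by omega) (by omega) (by omega)]
      have h2a : 2*(l/2) = l := by omega
      have h2b : 2*(r/2 - l/2 + 1) = r-l+1 := by omega
      rw [h2a, h2b]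


theorem getD_setIfInBounds_ne (a : Array Int) (i j : Nat) (v : Int) (h : i ≠ j) :
    (a.setIfInBounds i v).getD j 0 = a.getD j 0 := by
  simp [Array.getD, Array.size_setIfInBounds]
  split
  · rw [Array.getElem_setIfInBounds_ne]; omega
  · rfl

theorem getD_setIfInBounds_self (a : Array Int) (i : Nat) (v : Int) (h : i < a.size) :
    (a.setIfInBounds i v).getD i 0 = v := by
  simp [Array.getD, Array.size_setIfInBounds, h]

theorem getD_toArray (l : List Int) (j : Nat) : (l.toArray).getD j 0 = l.getD j 0 := by
  simp [Array.getD, List.getD]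
  split
  · rename_i h; rw [List.getElem?_eq_getElem h]; rfl
  · rename_i h; rw [List.getElem?_eq_none (by omega)]; rfl

def buildStep (op : Int → Int → Int) : Array Int → Int → Array Int := fun st i =>
  st.setIfInBounds i.toNat (op (st.getD (2*i).toNat 0) (st.getD (2*i+1).toNat 0))

def buildIter (op : Int → Int → Int) (nums : List Int) (m : Nat) : Array Int :=
  ((List.range m).map (fun k : Nat => ((nums.length:Int) - 1 - (k:Int)))).foldl (buildStep op)
    ((List.replicate nums.length (0:Int) ++ nums).toArray)

theorem buildIter_succ (op : Int → Int → Int) (nums : List Int) (m : Nat) :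
    buildIter op nums (m+1) = buildStep op (buildIter op nums m) ((nums.length:Int)-1-(m:Int)) := by
  simp [buildIter, List.range_succ]

theorem buildIter_spec (op : Int → Int → Int) (nums : List Int) :
    ∀ m, m ≤ nums.length - 1 →
    (buildIter op nums m).size = 2*nums.length
    ∧ (∀ j : Nat, nums.length ≤ j →
        (buildIter op nums m).getD j 0 = (List.replicate nums.length (0:Int) ++ nums).getD j 0)
    ∧ (∀ j : Nat, nums.length - m ≤ j → j < nums.length →
        (buildIter op nums m).getD j 0
          = op ((buildIter op nums m).getD (2*j) 0) ((buildIter op nums m).getD (2*j+1) 0)) := by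
  intro m
  induction m with
  | zero =>
    intro _
    refine ⟨by simp [buildIter]; omega, fun j _ => by simp [buildIter, getD_toArray], fun j h1 h2 => by omega⟩
  | succ m ih =>
    intro hm
    obtain ⟨ihs, ihl, ihv⟩ := ih (by omega)
    have hmn : m + 1 ≤ nums.length - 1 := hm
    have ht : ((nums.length:Int)-1-(m:Int)).toNat = nums.length-1-m := by omega
    have h2t : ((2:Int)*((nums.length:Int)-1-(m:Int))).toNat = 2*(nums.length-1-m) := by omega
    have h2t1 : ((2:Int)*((nums.length:Int)-1-(m:Int))+1).toNat = 2*(nums.length-1-m)+1 := by omega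
    have hstep : buildIter op nums (m+1)
        = (buildIter op nums m).setIfInBounds (nums.length-1-m)
            (op ((buildIter op nums m).getD (2*(nums.length-1-m)) 0)
              ((buildIter op nums m).getD (2*(nums.length-1-m)+1) 0)) := by
      rw [buildIter_succ]
      simp only [buildStep, ht, h2t, h2t1]
    set n := nums.length with hn
    set t := n-1-m with htdef
    have ht1 : 1 ≤ t := by omega
    have htn : t < n := by omega
    refine ⟨?_, ?_, ?_⟩
    · rw [hstep, Array.size_setIfInBounds]; exact ihs
    · intro j hj
      rw [hstep, getD_setIfInBounds_ne _ _ _ _ (by omega)]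
      exact ihl j hj
    · intro j hj1 hj2
      by_cases hjt : j = t
      · subst hjt
        rw [hstep, getD_setIfInBounds_self _ _ _ (by rw [ihs]; omega),
            getD_setIfInBounds_ne _ _ _ _ (by omega), getD_setIfInBounds_ne _ _ _ _ (by omega)]
      · rw [hstep, getD_setIfInBounds_ne _ _ _ _ (by omega),
            getD_setIfInBounds_ne _ _ _ _ (by omega), getD_setIfInBounds_ne _ _ _ _ (by omega)]
        exact ihv j (by omega) hj2

-- the three facts about the built segment-tree array
theorem stBuild_spec (op : Int → Int → Int) (nums : List Int) :
    (stBuild op nums).size = 2 * nums.length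
    ∧ (∀ i : Nat, i < nums.length → (stBuild op nums).getD (nums.length + i) 0 = nums.getD i 0)
    ∧ (∀ i : Nat, 1 ≤ i → i < nums.length → (stBuild op nums).getD i 0
         = op ((stBuild op nums).getD (2*i) 0) ((stBuild op nums).getD (2*i+1) 0)) := by
  have hb : stBuild op nums = buildIter op nums (nums.length - 1) := by
    have hcount : ((nums.length:Int) - 1).toNat = nums.length - 1 := by omega
    simp only [buildIter, stBuild, PySem.List.pyRange_neg_one, sub_zero, hcount]
    rfl
  obtain ⟨hs, hl, hv⟩ := buildIter_spec op nums (nums.length - 1) (le_refl _)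
  refine ⟨by rw [hb]; exact hs, ?_, ?_⟩
  · intro i hi
    rw [hb, hl (nums.length + i) (by omega)]
    simp [List.getD, List.getElem?_append_right]
  · intro i h1 h2
    rw [hb]
    exact hv i (by omega) h2


theorem ofold_some (op : Int → Int → Int) : ∀ (xs : List Int) (a : Int),
    ofold op (some a) xs = some (xs.foldl op a) := by
  intro xs
  induction xs with
  | nil => intro a; rfl
  | cons x xs ih => intro a; exact ih (op a x)

-- indices [l, l+c) read through getD are the sublist drop-take
theorem map_getD_range' (xs : List Int) : ∀ (c l : Nat), l + c ≤ xs.length →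
    (List.range' l c).map (fun i => xs.getD i 0) = (xs.drop l).take c := by
  intro c
  induction c with
  | zero => intro l _; simp
  | succ c ih =>
    intro l hlc
    rw [List.range'_succ, List.map_cons, ih (l+1) (by omega)]
    rw [List.drop_eq_getElem_cons (by omega : l < xs.length), List.take_succ_cons,
        List.getD_eq_getElem xs 0 (by omega)]

-- query over the built tree = fold of op over the subarray, seeded with its first element
theorem stQuery_getD (op : Int → Int → Int)
    (hassoc : ∀ a b c, op (op a b) c = op a (op b c))
    (hcomm : ∀ a b, op a b = op b a)
    (hidem : ∀ a, op a a = a)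
    (nums : List Int) (l r : Nat) (hl : l ≤ r) (hr : r < nums.length) :
    (stQuery op (stBuild op nums) (↑nums.length) (↑l) (↑r)).getD 0
      = (seg nums l r).foldl op (nums.getD l 0) := by
  obtain ⟨hs, hleaf, hinv⟩ := stBuild_spec op nums
  unfold stQuery
  have hcl : ((l:Int) + ↑nums.length) = ((l + nums.length : Nat) : Int) := by push_cast; ring
  have hcr : ((r:Int) + ↑nums.length) = ((r + nums.length : Nat) : Int) := by push_cast; ring
  rw [hcl, hcr,
    stQueryLoop_eq op hassoc hcomm _ nums.length hinv (r+nums.length) (l+nums.length) none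
      (by omega) (by omega) (by omega)]
  have hcount : r + nums.length - (l + nums.length) + 1 = r - l + 1 := by omega
  have hshift : List.range' (l + nums.length) (r - l + 1)
      = (List.range' l (r - l + 1)).map (fun x => nums.length + x) := by
    rw [List.map_add_range']
    congr 1
    omega
  have hmap : (List.range' (l + nums.length) (r - l + 1)).map (fun i => (stBuild op nums).getD i 0)
      = (List.range' l (r - l + 1)).map (fun i => nums.getD i 0) := by
    rw [hshift, List.map_map]
    apply List.map_congr_left
    intro j hj
    have hj' := List.mem_range'_1.mp hj
    exact hleaf j (by omega)
  rw [hcount, hmap, map_getD_range' nums (r-l+1) l (by omega)]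
  have hcons : (nums.drop l).take (r - l + 1) = nums.getD l 0 :: ((nums.drop (l+1)).take (r-l)) := by
    rw [List.drop_eq_getElem_cons (by omega : l < nums.length), List.take_succ_cons,
        List.getD_eq_getElem nums 0 (by omega)]
  have hseg2 : seg nums l r = nums.getD l 0 :: ((nums.drop (l+1)).take (r-l)) := by
    unfold seg
    have h : r + 1 - l = (r - l) + 1 := by omega
    rw [h, hcons]
  rw [hcons, hseg2, ofold_cons, List.foldl_cons, hidem]
  show (ofold op (some (nums.getD l 0)) _).getD 0 = _
  rw [ofold_some]
  rfl


-- the values B's inner loop appends for one l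
def rowSpec (mx mn : Int) : List Int → List Int
  | [] => []
  | x :: xs => (max mx x - min mn x) :: rowSpec (max mx x) (min mn x) xs

theorem innerB_eq : ∀ (xs : List Int) (mx mn : Int) (vals : List Int),
    innerB mx mn vals xs = vals ++ rowSpec mx mn xs := by
  intro xs
  induction xs with
  | nil => intro mx mn vals; simp [innerB, rowSpec]
  | cons x xs ih =>
    intro mx mn vals
    rw [innerB, ih, rowSpec, List.append_assoc]
    rfl

theorem rowSpec_eq : ∀ (xs : List Int) (mx mn : Int),
    rowSpec mx mn xs = (List.range xs.length).map
      (fun i => (xs.take (i+1)).foldl (fun a b => max a b) mx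
        - (xs.take (i+1)).foldl (fun a b => min a b) mn) := by
  intro xs
  induction xs with
  | nil => intro mx mn; rfl
  | cons x xs ih =>
    intro mx mn
    rw [rowSpec, ih]
    simp only [List.length_cons, List.range_succ_eq_map, List.map_cons, List.map_map]
    rfl

theorem row_eq (nums : List Int) (l : Nat) :
    rowSpec (nums.getD l 0) (nums.getD l 0) (nums.drop l)
      = (List.range (nums.length - l)).map (fun i => vspec nums l (l+i)) := by
  rw [rowSpec_eq]
  rw [List.length_drop]
  apply List.map_congr_left
  intro i _
  unfold vspec seg
  have h : l + i + 1 - l = i + 1 := by omega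
  rw [h]

theorem collectB_loop (nums : List Int) : ∀ (L : List Nat) (acc : List Int),
    L.foldl (fun vals l => innerB (nums.getD l 0) (nums.getD l 0) vals (nums.drop l)) acc
      = acc ++ L.flatMap (fun l => rowSpec (nums.getD l 0) (nums.getD l 0) (nums.drop l)) := by
  intro L
  induction L with
  | nil => intro acc; simp
  | cons l L ih =>
    intro acc
    rw [List.foldl_cons, ih, innerB_eq, List.flatMap_cons, List.append_assoc]

theorem collectB_eq (nums : List Int) :
    collectB nums = (List.range nums.length).flatMap
      (fun l => (List.range (nums.length - l)).map (fun i => vspec nums l (l+i))) := by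
  unfold collectB
  rw [collectB_loop, List.nil_append]
  apply List.flatMap_congr ?_
  intro l _
  exact row_eq nums l

theorem length_collectB (nums : List Int) :
    (collectB nums).length = nums.length * (nums.length + 1) / 2 := by
  rw [collectB_eq, List.length_flatMap]
  have h1 : ((List.range nums.length).map
      (fun l => ((List.range (nums.length - l)).map (fun i => vspec nums l (l+i))).length)).sum
      = ((List.range nums.length).map (fun l => nums.length - l)).sum := by
    congr 1
    apply List.map_congr_left
    intro l _
    simp
  rw [h1]
  have h2 : ∀ n : Nat, 2 * ((List.range n).map (fun l => n - l)).sum = n * (n + 1) := by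
    intro n
    induction n with
    | zero => rfl
    | succ n ihn =>
      have hsplit : (List.range (n+1)).map (fun l => n + 1 - l)
          = ((List.range n).map (fun l => n + 1 - l)) ++ [1] := by
        rw [List.range_succ, List.map_append]
        simp
      have hpt : ((List.range n).map (fun l => n + 1 - l)).sum
          = ((List.range n).map (fun l => (n - l) + 1)).sum := by
        congr 1
        apply List.map_congr_left
        intro l hl
        have := List.mem_range.mp hl
        omega
      have haddgen : ∀ (L : List Nat) (f : Nat → Nat),
          (L.map (fun x => f x + 1)).sum = (L.map f).sum + L.length := by
        intro L f
        induction L with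
        | nil => rfl
        | cons a L ihL => simp [ihL]; omega
      have hadd : ((List.range n).map (fun l => (n - l) + 1)).sum
          = ((List.range n).map (fun l => n - l)).sum + n := by
        rw [haddgen (List.range n) (fun l => n - l), List.length_range]
      rw [hsplit, List.sum_append, hpt, hadd]
      simp only [List.sum_cons, List.sum_nil]
      have := ihn
      nlinarith [ihn]
    
  have := h2 nums.length
  omega


-- (max - min) of a subarray grows when the subarray is extended on the right
theorem vspec_mono (nums : List Int) (l r : Nat) (hl : l ≤ r) (hr : r + 1 < nums.length) :
    vspec nums l r ≤ vspec nums l (r+1) := by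
  have hseg : seg nums l (r+1) = seg nums l r ++ (nums.drop l)[r+1-l]?.toList := by
    unfold seg
    have h : r+1+1-l = (r+1-l)+1 := by omega
    rw [h, List.take_add_one]
  have hget : (nums.drop l)[r+1-l]? = some (nums.getD (r+1) 0) := by
    rw [List.getElem?_drop]
    have h : l + (r+1-l) = r+1 := by omega
    rw [h, List.getElem?_eq_getElem (by omega), List.getD_eq_getElem nums 0 (by omega)]
  rw [hget] at hseg
  unfold vspec
  rw [hseg, List.foldl_append, List.foldl_append]
  simp only [Option.toList_some, List.foldl_cons, List.foldl_nil]
  have h1 : (seg nums l r).foldl (fun a b => max a b) (nums.getD l 0)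
      ≤ max ((seg nums l r).foldl (fun a b => max a b) (nums.getD l 0)) (nums.getD (r+1) 0) :=
    le_max_left _ _
  have h2 : min ((seg nums l r).foldl (fun a b => min a b) (nums.getD l 0)) (nums.getD (r+1) 0)
      ≤ (seg nums l r).foldl (fun a b => min a b) (nums.getD l 0) :=
    min_le_left _ _
  omega

theorem tripLe_total (a b : Int × Int × Int) : tripLe a b = true ∨ tripLe b a = true := by
  simp [tripLe]
  omega

theorem tripLe_trans {a b c : Int × Int × Int} (h1 : tripLe a b = true) (h2 : tripLe b c = true) :
    tripLe a c = true := by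
  simp [tripLe] at *
  omega

theorem mem_hpush {x z : Int × Int × Int} {l : List (Int × Int × Int)} :
    z ∈ hpush x l ↔ z = x ∨ z ∈ l := by
  rw [(hpush_perm x l).mem_iff, List.mem_cons]

theorem hpush_sorted (x : Int × Int × Int) (l : List (Int × Int × Int))
    (h : l.Pairwise (fun a b => tripLe a b = true)) :
    (hpush x l).Pairwise (fun a b => tripLe a b = true) := by
  induction l with
  | nil => simp [hpush]
  | cons y ys ih =>
    rw [List.pairwise_cons] at h
    obtain ⟨hy, hys⟩ := h
    rw [hpush]
    split
    · rename_i hxy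
      rw [List.pairwise_cons]
      refine ⟨?_, List.pairwise_cons.mpr ⟨hy, hys⟩⟩
      intro z hz
      rcases List.mem_cons.mp hz with h1 | h2
      · subst h1; exact hxy
      · exact tripLe_trans hxy (hy z h2)
    · rename_i hxy
      have hyx : tripLe y x = true := by
        rcases tripLe_total x y with h1 | h1
        · exact absurd h1 hxy
        · exact h1
      rw [List.pairwise_cons]
      refine ⟨?_, ih hys⟩
      intro z hz
      rcases mem_hpush.mp hz with h1 | h2
      · subst h1; exact hyx
      · exact hy z h2

theorem entryVals_cons (v : Int → Int → Int) (l r : Int) (h : l ≤ r) :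
    entryVals v l r = v l r :: entryVals v l (r-1) := by
  rw [entryVals]
  simp [h]

theorem entryVals_nil (v : Int → Int → Int) (l r : Int) (h : ¬ l ≤ r) :
    entryVals v l r = [] := by
  rw [entryVals]
  simp [h]

theorem mem_entryVals (v : Int → Int → Int) : ∀ (c : Nat) (l r : Int), (r - l + 1).toNat ≤ c →
    ∀ x ∈ entryVals v l r, ∃ r' : Int, l ≤ r' ∧ r' ≤ r ∧ x = v l r' := by
  intro c
  induction c with
  | zero =>
    intro l r hc x hx
    rw [entryVals_nil v l r (by omega)] at hx
    simp at hx
  | succ c ih =>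
    intro l r hc x hx
    by_cases hlr : l ≤ r
    · rw [entryVals_cons v l r hlr] at hx
      rcases List.mem_cons.mp hx with h1 | h2
      · exact ⟨r, hlr, le_refl r, h1⟩
      · obtain ⟨r', h1, h2, h3⟩ := ih l (r-1) (by omega) x h2
        exact ⟨r', h1, by omega, h3⟩
    · rw [entryVals_nil v l r hlr] at hx
      simp at hx


theorem tripLe_fst {a b : Int × Int × Int} (h : tripLe a b = true) : a.1 ≤ b.1 := by
  simp [tripLe] at h
  omega

theorem v_chain (v : Int → Int → Int) (n : Nat)
    (hmono : ∀ l r : Int, 0 ≤ l → l ≤ r → r + 1 < (n:Int) → v l r ≤ v l (r+1)) :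
    ∀ (c : Nat) (l r' r : Int), 0 ≤ l → l ≤ r' → r' ≤ r → r < (n:Int) → (r - r').toNat ≤ c →
    v l r' ≤ v l r := by
  intro c
  induction c with
  | zero =>
    intro l r' r h0 h1 h2 h3 hc
    have : r' = r := by omega
    subst this
    exact le_refl _
  | succ c ih =>
    intro l r' r h0 h1 h2 h3 hc
    by_cases hr : r' = r
    · subst hr; exact le_refl _
    · have h4 : v l (r-1) ≤ v l r := by
        have := hmono l (r-1) h0 (by omega) (by omega)
        simpa using this
      exact le_trans (ih l r' (r-1) h0 h1 (by omega) (by omega) (by omega)) h4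

theorem entryVals_le (v : Int → Int → Int) (n : Nat)
    (hmono : ∀ l r : Int, 0 ≤ l → l ≤ r → r + 1 < (n:Int) → v l r ≤ v l (r+1))
    (l r : Int) (h0 : 0 ≤ l) (h2 : r < (n:Int)) :
    ∀ x ∈ entryVals v l r, x ≤ v l r := by
  intro x hx
  obtain ⟨r', hr1, hr2, hr3⟩ := mem_entryVals v (r - l + 1).toNat l r (le_refl _) x hx
  subst hr3
  exact v_chain v n hmono (r - r').toNat l r' r h0 hr1 hr2 h2 (le_refl _)

theorem covered_cons (v : Int → Int → Int) (e : Int × Int × Int) (pq : List (Int × Int × Int)) :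
    covered v (e :: pq) = entryVals v e.2.1 e.2.2 ++ covered v pq := by
  simp [covered]

-- A's pop loop sums, in order, the heads of the descending-sorted list of covered values
theorem aloop_eq (v : Int → Int → Int) (n : Nat)
    (hmono : ∀ l r : Int, 0 ≤ l → l ≤ r → r + 1 < (n:Int) → v l r ≤ v l (r+1)) :
    ∀ (K : Nat) (pq : List (Int × Int × Int)) (s : List Int) (res : Int),
    pq.Pairwise (fun a b => tripLe a b = true) →
    EntriesOK v n pq →
    s.Pairwise (fun a b : Int => b ≤ a) →
    s.Perm (covered v pq) →
    K ≤ s.length →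
    aloop v pq (↑K) res = popSumB s K res := by
  intro K
  induction K with
  | zero =>
    intro pq s res _ _ _ _ _
    rw [aloop.eq_def]
    simp [popSumB]
  | succ K ih =>
    intro pq s res hsort hok hsor hperm hlen
    cases s with
    | nil => simp at hlen
    | cons s0 s' =>
    cases pq with
    | nil =>
      have : covered v ([] : List (Int × Int × Int)) = [] := rfl
      rw [this] at hperm
      have := hperm.length_eq
      simp at this
    | cons e rest =>
    obtain ⟨x, l, r⟩ := e
    have he := hok (x, l, r) List.mem_cons_self
    obtain ⟨he0, he1, he2, he3⟩ := he
    dsimp only at he0 he1 he2 he3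
    have hcov : covered v ((x, l, r) :: rest)
        = v l r :: (entryVals v l (r-1) ++ covered v rest) := by
      rw [covered_cons, entryVals_cons v l r he1]
      rfl
    -- the head of s is exactly v l r
    have hvin : v l r ∈ (s0 :: s') := by
      rw [hperm.mem_iff, hcov]
      exact List.mem_cons_self
    have hallle : ∀ y ∈ (s0 :: s'), y ≤ v l r := by
      intro y hy
      have hyc : y ∈ covered v ((x, l, r) :: rest) := hperm.subset hy
      obtain ⟨e', he'm, he'v⟩ := List.mem_flatMap.mp hyc
      have hee := hok e' he'm
      have h1 : y ≤ v e'.2.1 e'.2.2 :=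
        entryVals_le v n hmono e'.2.1 e'.2.2 hee.1 hee.2.2.1 y he'v
      have h2 : v e'.2.1 e'.2.2 ≤ v l r := by
        rcases List.mem_cons.mp he'm with h | h
        · subst h; exact le_refl _
        · have := tripLe_fst ((List.pairwise_cons.mp hsort).1 e' h)
          rw [he3, hee.2.2.2] at this
          omega
      exact le_trans h1 h2
    have hs0 : s0 = v l r := by
      have h1 : s0 ≤ v l r := hallle s0 List.mem_cons_self
      have h2 : v l r ≤ s0 := by
        rcases List.mem_cons.mp hvin with h | h
        · omega
        · exact (List.pairwise_cons.mp hsor).1 _ h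
      omega
    -- unfold one step of aloop
    rw [aloop.eq_def]
    rw [if_neg (by omega : ¬((K+1 : Nat) : Int) = 0)]
    have hk : ((K+1 : Nat) : Int) - 1 = (K : Int) := by push_cast; ring
    show aloop v (if l ≤ r - 1 then hpush (-v l (r - 1), l, r - 1) rest else rest)
        (((K+1 : Nat) : Int) - 1) (res + -x) = popSumB (s0 :: s') (K+1) res
    rw [hk, he3, neg_neg]
    have hrhs : popSumB (s0 :: s') (K+1) res = popSumB s' K (res + s0) := rfl
    rw [hrhs, hs0]
    -- the new queue covers s'
    have hX : (s0 :: s').Perm (s0 :: (entryVals v l (r-1) ++ covered v rest)) := by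
      rw [← hs0] at hcov
      rw [← hcov]
      exact hperm
    have hs' : s'.Perm (entryVals v l (r-1) ++ covered v rest) := hX.cons_inv
    by_cases hshr : l ≤ r - 1
    · rw [if_pos hshr]
      apply ih (hpush (-v l (r - 1), l, r - 1) rest) s' (res + v l r)
      · exact hpush_sorted _ _ (List.pairwise_cons.mp hsort).2
      · intro e' he'
        rcases mem_hpush.mp he' with h | h
        · subst h
          refine ⟨?_, ?_, ?_, rfl⟩ <;> dsimp only <;> omega
        · exact hok e' (List.mem_cons_of_mem _ h)
      · exact (List.pairwise_cons.mp hsor).2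
      · refine hs'.trans ?_
        have hp : ((-v l (r - 1), l, r - 1) :: rest).Perm (hpush (-v l (r - 1), l, r - 1) rest) :=
          (hpush_perm _ _).symm
        have := List.Perm.flatMap (f := fun e => entryVals v e.2.1 e.2.2)
          (g := fun e => entryVals v e.2.1 e.2.2) hp (fun a _ => List.Perm.refl _)
        exact this
      · simpa using hlen
    · rw [if_neg hshr]
      apply ih rest s' (res + v l r)
      · exact (List.pairwise_cons.mp hsort).2
      · intro e' he'
        exact hok e' (List.mem_cons_of_mem _ he')
      · exact (List.pairwise_cons.mp hsor).2
      · rw [entryVals_nil v l (r-1) hshr] at hs'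
        simpa using hs'
      · simpa using hlen


theorem foldl_hpush_perm (e : Int → Int × Int × Int) :
    ∀ (L : List Int) (acc : List (Int × Int × Int)),
    (L.foldl (fun pq l => hpush (e l) pq) acc).Perm (L.map e ++ acc) := by
  intro L
  induction L with
  | nil => intro acc; simp
  | cons x L ih =>
    intro acc
    rw [List.foldl_cons]
    refine (ih (hpush (e x) acc)).trans ?_
    refine (List.Perm.append_left (L.map e) (hpush_perm (e x) acc)).trans ?_
    simpa using List.perm_middle.symm

theorem foldl_hpush_sorted (e : Int → Int × Int × Int) :
    ∀ (L : List Int) (acc : List (Int × Int × Int)),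
    acc.Pairwise (fun a b => tripLe a b = true) →
    (L.foldl (fun pq l => hpush (e l) pq) acc).Pairwise (fun a b => tripLe a b = true) := by
  intro L
  induction L with
  | nil => intro acc h; exact h
  | cons x L ih =>
    intro acc h
    rw [List.foldl_cons]
    exact ih _ (hpush_sorted _ _ h)

-- A's entry values, left to right, are B's row for l reversed
theorem entryVals_eq_rev (v : Int → Int → Int) (nums : List Int)
    (hv : ∀ l r : Nat, l ≤ r → r < nums.length → v (↑l) (↑r) = vspec nums l r) :
    ∀ (c l r : Nat), r = l + c → r < nums.length →
    entryVals v (↑l) (↑r) = ((List.range (r+1-l)).map (fun i => vspec nums l (l+i))).reverse := by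
  intro c
  induction c with
  | zero =>
    intro l r hr hrn
    rw [entryVals_cons v _ _ (by omega), entryVals_nil v _ _ (by omega)]
    have h1 : r + 1 - l = 1 := by omega
    rw [h1, hv l r (by omega) hrn]
    have h2 : l = r := by omega
    subst h2
    simp
  | succ c ih =>
    intro l r hr hrn
    subst hr
    rw [entryVals_cons v _ _ (by push_cast; omega)]
    have hcast : ((l + (c+1) : Nat) : Int) - 1 = ((l + c : Nat) : Int) := by push_cast; ring
    rw [hcast, ih l (l+c) rfl (by omega)]
    have h1 : l + (c+1) + 1 - l = (l + c + 1 - l) + 1 := by omega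
    rw [h1, List.range_succ, List.map_append, List.reverse_append]
    have h2 : l + c + 1 - l = c + 1 := by omega
    rw [h2]
    simp only [List.map_cons, List.map_nil, List.reverse_cons, List.reverse_nil, List.nil_append,
      List.singleton_append]
    rw [hv l (l+(c+1)) (by omega) hrn]

-- proof-side names for A's value function and initial heap
def vA (nums : List Int) : Int → Int → Int := fun l r =>
  (stQuery (fun a b => max a b) (stBuild (fun a b => max a b) nums) (↑nums.length) l r).getD 0
    - (stQuery (fun a b => min a b) (stBuild (fun a b => min a b) nums) (↑nums.length) l r).getD 0

def pqA (nums : List Int) : List (Int × Int × Int) :=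
  (PySem.List.pyRange 0 (↑nums.length) 1).foldl
    (fun pq l => hpush (-(vA nums l ((nums.length:Int) - 1)), l, (nums.length:Int) - 1) pq) []

theorem vA_eq (nums : List Int) (l r : Nat) (h1 : l ≤ r) (h2 : r < nums.length) :
    vA nums (↑l) (↑r) = vspec nums l r := by
  unfold vA
  rw [stQuery_getD _ (fun a b c => max_assoc a b c) (fun a b => max_comm a b) (fun a => max_self a)
      nums l r h1 h2,
    stQuery_getD _ (fun a b c => min_assoc a b c) (fun a b => min_comm a b) (fun a => min_self a)
      nums l r h1 h2]
  rfl

theorem vA_mono (nums : List Int) : ∀ l r : Int, 0 ≤ l → l ≤ r → r + 1 < (nums.length : Int) →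
    vA nums l r ≤ vA nums l (r+1) := by
  intro l r h0 h1 h2
  calc vA nums l r = vspec nums l.toNat r.toNat := by
        rw [← vA_eq nums l.toNat r.toNat (by omega) (by omega)]
        congr 1 <;> omega
    _ ≤ vspec nums l.toNat (r.toNat + 1) := vspec_mono nums l.toNat r.toNat (by omega) (by omega)
    _ = vA nums l (r+1) := by
        rw [← vA_eq nums l.toNat (r.toNat + 1) (by omega) (by omega)]
        congr 1 <;> omega

-- ===== VERDICT (by name: the statement is the Claim_ definition above) =====
theorem maxTotalValue_spec : Claim_equal_maxTotalValue := by
  unfold Claim_equal_maxTotalValue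
  intro nums k _ hpre
  unfold Spec_maxTotalValue
  unfold Pre_maxTotalValue at hpre
  obtain ⟨hk0, hkmax⟩ := hpre
  have hA : maxTotalValue nums k = aloop (vA nums) (pqA nums) k 0 := rfl
  have hpq0 := foldl_hpush_perm
    (fun li => (-(vA nums li ((nums.length:Int) - 1)), li, (nums.length:Int) - 1))
    (PySem.List.pyRange 0 (↑nums.length) 1) []
  have hpqA : (pqA nums).Perm ((PySem.List.pyRange 0 (↑nums.length) 1).map
      (fun li => (-(vA nums li ((nums.length:Int) - 1)), li, (nums.length:Int) - 1))) := by
    rw [pqA]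
    simpa using hpq0
  have hcov1 : (covered (vA nums) (pqA nums)).Perm (collectB nums) := by
    refine (List.Perm.flatMap hpqA (fun a _ => List.Perm.refl _)).trans ?_
    rw [List.flatMap_map, PySem.List.pyRange_zero_nat, List.flatMap_map]
    rw [collectB_eq]
    refine List.Perm.flatMap (List.Perm.refl _) ?_
    intro l hl
    have hln : l < nums.length := List.mem_range.mp hl
    have hc : ((nums.length:Int) - 1) = ((nums.length - 1 : Nat) : Int) := by omega
    dsimp only
    rw [hc, entryVals_eq_rev (vA nums) nums (vA_eq nums)
        (nums.length - 1 - l) l (nums.length - 1) (by omega) (by omega)]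
    have hcount : nums.length - 1 + 1 - l = nums.length - l := by omega
    rw [hcount]
    exact List.reverse_perm _
  have hok : EntriesOK (vA nums) nums.length (pqA nums) := by
    intro e he
    obtain ⟨li, hli, hei⟩ := List.mem_map.mp (hpqA.mem_iff.mp he)
    have hb := PySem.List.mem_pyRange_one.mp hli
    subst hei
    refine ⟨?_, ?_, ?_, rfl⟩ <;> dsimp only <;> omega
  have hsorted : (pqA nums).Pairwise (fun a b => tripLe a b = true) := by
    rw [pqA]
    exact foldl_hpush_sorted _ _ [] List.Pairwise.nil
  have hsor : (PySem.List.sorted (collectB nums) (fun x => x) true).Pairwise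
      (fun a b : Int => b ≤ a) := by
    simpa using PySem.List.sorted_pairwise_rev (collectB nums) (fun x => x)
  have hsperm : (PySem.List.sorted (collectB nums) (fun x => x) true).Perm
      (covered (vA nums) (pqA nums)) :=
    (PySem.List.sorted_perm _ _ _).trans hcov1.symm
  have hlen : k.toNat ≤ (PySem.List.sorted (collectB nums) (fun x => x) true).length := by
    have h1 := (PySem.List.sorted_perm (collectB nums) (fun x => x) true).length_eq
    rw [h1, length_collectB]
    omega
  have hk : k = ((k.toNat : Nat) : Int) := by omega
  rw [hA, hk, aloop_eq (vA nums) nums.length (vA_mono nums) k.toNat (pqA nums)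
    (PySem.List.sorted (collectB nums) (fun x => x) true) 0 hsorted hok hsor hsperm hlen]
  rfl
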